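-- pv_equiv track=rewrite | github.com/chaitanyame/thanksgiving_deals | scripts/import_from_sheet_html.py | clean_title_for_search
-- ===== SOURCE A (Python) =====
-- def clean_title_for_search(title):
--     """Clean title for search: remove price info and extra text"""
--     search_title = title
--
--     # Remove anything after $ sign, + sign, or "from" keyword
--     for separator in [' $', ' from ', ' +', ' -', ' @']:
--         if separator in search_title:
--             search_title = search_title.split(separator)[0]
--
--     # Remove common deal phrases
--     search_title = search_title.replace('(various colors)', '').replace('(various sizes)', '')
--     search_title = search_title.replace('(select colors)', '').replace('(select sizes)', '')
--     search_title = ' '.join(search_title.split()).strip()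
--
--     return search_title
-- ===== SOURCE B (Python) =====
-- def clean_title_for_search(title):
--     """Clean title for search: remove price info and extra text"""
--     def cut(s, seps):
--         # sequentially truncate at the first occurrence of each separator
--         if not seps:
--             return s
--         p = s.find(seps[0])
--         return cut(s if p < 0 else s[:p], seps[1:])
--
--     def drop_phrases(s, phrases):
--         # removing every occurrence of a phrase = splitting on it and rejoining
--         if not phrases:
--             return s
--         return drop_phrases(''.join(s.split(phrases[0])), phrases[1:])
--
--     s = cut(title, [' $', ' from ', ' +', ' -', ' @'])
--     s = drop_phrases(s, ['(various colors)', '(various sizes)',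
--                          '(select colors)', '(select sizes)'])
--     return ' '.join(s.split()).strip()
-- ===== Notes on version B (the rewrite author's own statement) =====
-- stated objective: alternative
-- what changed: The in-test + split(sep)[0] truncation loop becomes a recursion that finds each separator's position and slices once per step, and the chained replace calls that delete each deal phrase become a recursive split-on-the-phrase-and-rejoin removal; same cost, different decomposition.
import Mathlib
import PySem

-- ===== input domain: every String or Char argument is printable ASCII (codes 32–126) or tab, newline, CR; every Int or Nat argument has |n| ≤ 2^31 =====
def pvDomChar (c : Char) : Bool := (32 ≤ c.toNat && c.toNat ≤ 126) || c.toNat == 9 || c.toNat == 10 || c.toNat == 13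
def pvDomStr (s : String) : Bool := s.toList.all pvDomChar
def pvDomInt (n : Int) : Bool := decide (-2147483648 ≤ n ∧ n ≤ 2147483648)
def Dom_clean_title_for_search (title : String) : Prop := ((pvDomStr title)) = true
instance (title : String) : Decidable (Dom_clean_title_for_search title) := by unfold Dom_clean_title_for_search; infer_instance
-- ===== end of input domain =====

-- B replaces A's in-test + split(sep)[0] truncation loop by a find-and-slice recursion and A's
-- chained replace calls by a recursive split-on-phrase-and-rejoin removal ("alternative", same cost).

-- ===== PORT A =====
-- str.split with a nonempty literal separator never returns an empty list, so Python's [0] is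
-- total here; it is ported as .headD "".
def clean_title_for_search (title : String) : String :=
  let search_title := title
  let search_title := [" $", " from ", " +", " -", " @"].foldl
    (fun s sep => if PySem.Str.isIn sep s then ((PySem.Str.split? s sep).getD []).headD "" else s)
    search_title
  let search_title :=
    PySem.Str.replace (PySem.Str.replace search_title "(various colors)" "") "(various sizes)" ""
  let search_title :=
    PySem.Str.replace (PySem.Str.replace search_title "(select colors)" "") "(select sizes)" ""
  let search_title := PySem.Str.strip (PySem.Str.join " " (PySem.Str.split₀ search_title))
  search_title

-- ===== PORT B =====
def pvCut (s : String) : List String → String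
  | [] => s
  | sep :: rest =>
      let p := PySem.Str.find s sep
      pvCut (if p < 0 then s else PySem.Str.slice s none (some p)) rest

def pvDropPhrases (s : String) : List String → String
  | [] => s
  | ph :: rest => pvDropPhrases (PySem.Str.join "" ((PySem.Str.split? s ph).getD [])) rest

def clean_title_for_search_alt (title : String) : String :=
  let s := pvCut title [" $", " from ", " +", " -", " @"]
  let s := pvDropPhrases s
    ["(various colors)", "(various sizes)", "(select colors)", "(select sizes)"]
  PySem.Str.strip (PySem.Str.join " " (PySem.Str.split₀ s))

-- ===== PRECONDITION & SPEC =====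
def Spec_clean_title_for_search (title : String) (out : String) : Prop := out = clean_title_for_search_alt title
instance (title : String) (out : String) : Decidable (Spec_clean_title_for_search title out) := by unfold Spec_clean_title_for_search; infer_instance

-- ===== CLAIM (what is proved, stated in full; the proofs are below) =====
def Claim_equal_clean_title_for_search : Prop := ∀ (title : String), Dom_clean_title_for_search title → Spec_clean_title_for_search title (clean_title_for_search title)

-- ===== LEMMAS AND PROOFS =====

-- the first piece of a character scan: everything before the first occurrence of sep
def cutAt (sep : List Char) : List Char → List Char
  | [] => []
  | c :: t => if sep.isPrefixOf (c :: t) then [] else c :: cutAt sep t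

-- replace.go with empty replacement: the character accumulator factors out
theorem pvR1 (old : List Char) (fuel : Nat) (l acc : List Char) :
    PySem.Chars.replace.go old [] fuel l acc = acc.reverse ++ PySem.Chars.replace.go old [] fuel l [] := by
  induction fuel generalizing l acc with
  | zero => simp [PySem.Chars.replace.go]
  | succ f ih =>
    cases l with
    | nil => simp [PySem.Chars.replace.go]
    | cons c t =>
      simp only [PySem.Chars.replace.go, List.reverse_nil, List.nil_append]
      split
      · exact ih _ acc
      · rw [ih t (c::acc), ih t [c]]
        simp

-- replace.go with empty replacement is fuel-insensitive once fuel ≥ length (old nonempty)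
theorem pvR2 (old : List Char) (hold : old ≠ []) (f1 f2 : Nat) (l acc : List Char)
    (h1 : l.length ≤ f1) (h2 : l.length ≤ f2) :
    PySem.Chars.replace.go old [] f1 l acc = PySem.Chars.replace.go old [] f2 l acc := by
  induction f1 generalizing f2 l acc with
  | zero =>
    cases l with
    | nil => cases f2 <;> simp [PySem.Chars.replace.go]
    | cons c t => simp at h1
  | succ g1 ih =>
    cases l with
    | nil => cases f2 <;> simp [PySem.Chars.replace.go]
    | cons c t =>
      cases f2 with
      | zero => simp at h2
      | succ g2 =>
        simp only [PySem.Chars.replace.go]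
        split
        · have hol : 1 ≤ old.length := by cases old with | nil => exact absurd rfl hold | cons a b => simp
          apply ih <;> · simp at h1 h2 ⊢; omega
        · apply ih <;> · simp at h1 h2 ⊢; omega

-- flattening splitOn.go's pieces is replace.go with empty replacement
theorem pvFlatten (sep : List Char) (fuel : Nat) (l cur : List Char) (acc : List (List Char)) :
    (PySem.Chars.splitOn.go sep fuel l cur acc).flatten
      = acc.reverse.flatten ++ cur.reverse ++ PySem.Chars.replace.go sep [] fuel l [] := by
  induction fuel generalizing l cur acc with
  | zero => simp [PySem.Chars.splitOn.go, PySem.Chars.replace.go]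
  | succ f ih =>
    cases l with
    | nil => simp [PySem.Chars.splitOn.go, PySem.Chars.replace.go]
    | cons c t =>
      simp only [PySem.Chars.splitOn.go, PySem.Chars.replace.go]
      split
      · rw [ih]
        simp
      · rw [ih, pvR1 sep f t [c]]
        simp

theorem pvJoinNil (parts : List (List Char)) : PySem.Chars.join [] parts = parts.flatten := by
  induction parts with
  | nil => rfl
  | cons a t ih =>
    cases t with
    | nil => simp [PySem.Chars.join, List.intercalate]
    | cons b u =>
      simp only [PySem.Chars.join, List.intercalate] at *
      simp [List.intersperse] at *
      simp [ih]

-- joining the split pieces with an empty joiner equals replacing sep by nothing (sep nonempty)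
theorem pvDropChars (s sep : List Char) (h : sep ≠ []) :
    PySem.Chars.join [] (PySem.Chars.splitOn s sep) = PySem.Chars.replace s sep [] := by
  rw [pvJoinNil, PySem.Chars.splitOn, pvFlatten, PySem.Chars.replace]
  simp [List.isEmpty_iff, h]
  exact pvR2 sep h (s.length + 1) s.length s [] (by omega) (by omega)

-- head of splitOn.go once the piece accumulator is nonempty: the first finished piece
theorem pvH1 (sep : List Char) (fuel : Nat) (l cur : List Char) (acc : List (List Char))
    (h : acc ≠ []) :
    (PySem.Chars.splitOn.go sep fuel l cur acc).headD [] = acc.getLastD [] := by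
  induction fuel generalizing l cur acc with
  | zero =>
    simp only [PySem.Chars.splitOn.go, List.headD_eq_head?, List.head?_reverse, List.getLast?_cons, List.getLastD_eq_getLast?]
    cases hq : acc.getLast? with
    | none => rw [List.getLast?_eq_none_iff] at hq; exact absurd hq h
    | some v => simp
  | succ f ih =>
    cases l with
    | nil =>
      simp only [PySem.Chars.splitOn.go, List.headD_eq_head?, List.head?_reverse, List.getLast?_cons, List.getLastD_eq_getLast?]
      cases hq : acc.getLast? with
      | none => rw [List.getLast?_eq_none_iff] at hq; exact absurd hq h
      | some v => simp
    | cons c t =>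
      simp only [PySem.Chars.splitOn.go]
      split
      · rw [ih _ _ _ (by simp)]
        cases acc with
        | nil => exact absurd rfl h
        | cons a u => simp [List.getLastD_eq_getLast?, List.getLast?_cons]
      · exact ih _ _ _ h

-- head of splitOn.go from an empty piece accumulator: scan up to the first sep occurrence
theorem pvH2 (sep : List Char) (fuel : Nat) (l cur : List Char) (h : l.length ≤ fuel) :
    (PySem.Chars.splitOn.go sep fuel l cur []).headD [] = cur.reverse ++ cutAt sep l := by
  induction fuel generalizing l cur with
  | zero =>
    cases l with
    | nil => simp [PySem.Chars.splitOn.go, cutAt]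
    | cons c t => simp at h
  | succ f ih =>
    cases l with
    | nil => simp [PySem.Chars.splitOn.go, cutAt]
    | cons c t =>
      simp only [PySem.Chars.splitOn.go, cutAt]
      split
      · rw [pvH1 _ _ _ _ _ (by simp)]
        simp
      · rw [ih t (c :: cur) (by simp at h ⊢; omega)]
        simp

theorem pvCutAt_no (sep l : List Char) (h : ∀ i, ¬ sep <+: l.drop i) : cutAt sep l = l := by
  induction l with
  | nil => rfl
  | cons c t ih =>
    simp only [cutAt]
    rw [if_neg, ih]
    · intro i; have := h (i + 1); simpa using this
    · have := h 0
      simp only [List.drop_zero] at this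
      simpa [List.isPrefixOf_iff_prefix] using this

theorem pvCutAt_yes (sep l : List Char) (j : Nat) (hj : sep <+: l.drop j)
    (hmin : ∀ i < j, ¬ sep <+: l.drop i) : cutAt sep l = l.take j := by
  induction l generalizing j with
  | nil =>
    simp at hj
    simp [cutAt]
  | cons c t ih =>
    cases j with
    | zero =>
      simp only [List.drop_zero] at hj
      simp [cutAt, List.isPrefixOf_iff_prefix, hj]
    | succ k =>
      simp only [cutAt, List.take_succ_cons]
      rw [if_neg, ih k (by simpa using hj) (fun i hi => by have := hmin (i+1) (by omega); simpa using this)]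
      have := hmin 0 (by omega)
      simp only [List.drop_zero] at this
      simpa [List.isPrefixOf_iff_prefix] using this

-- split(sep)[0] = s[:find(sep)] (or s itself when sep is absent), character level
theorem pvHeadChars (s sep : List Char) :
    (PySem.Chars.splitOn s sep).headD []
      = if PySem.Chars.find s sep < 0 then s else s.take (PySem.Chars.find s sep).toNat := by
  rw [PySem.Chars.splitOn, pvH2 sep (s.length+1) s [] (by omega)]
  simp only [List.reverse_nil, List.nil_append]
  split
  · have hne : PySem.Chars.find s sep = -1 := by
      have := PySem.Chars.neg_one_le_find (s := s) (sub := sep)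
      omega
    rw [PySem.Chars.find_eq_neg_one_iff] at hne
    apply pvCutAt_no
    intro i hp
    exact hne (List.infix_iff_prefix_suffix.mpr ⟨_, hp, List.drop_suffix _ _⟩)
  · have hge : 0 ≤ PySem.Chars.find s sep := by omega
    obtain ⟨h1, h2⟩ := PySem.Chars.find_spec hge
    exact pvCutAt_yes sep s _ h1 h2

-- one truncation step of A equals one step of B, String level
theorem pvCutStep (s sep : String) (h : sep.toList ≠ []) :
    (if PySem.Str.isIn sep s then ((PySem.Str.split? s sep).getD []).headD "" else s)
      = (if PySem.Str.find s sep < 0 then s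
         else PySem.Str.slice s none (some (PySem.Str.find s sep))) := by
  by_cases hin : PySem.Str.isIn sep s = true
  · rw [if_pos hin, if_neg]
    · apply String.toList_inj.mp
      have hsp := PySem.Str.split?_map s sep
      rw [PySem.Chars.split?, if_neg (by simpa [List.isEmpty_iff] using h)] at hsp
      cases hps : PySem.Str.split? s sep with
      | none => rw [hps] at hsp; simp at hsp
      | some parts =>
        rw [hps] at hsp
        simp only [Option.map_some, Option.some_inj] at hsp
        have hfind : 0 ≤ PySem.Str.find s sep := by
          rw [PySem.Str.find_nonneg_iff]
          rwa [PySem.Str.isIn_iff_infix] at hin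
        rw [Option.getD_some]
        have h1 : (parts.headD "").toList = (parts.map String.toList).headD [] := by
          cases parts <;> simp
        rw [h1, hsp, pvHeadChars]
        rw [if_neg (by simp [PySem.Str.find_eq] at hfind ⊢; omega)]
        have h2 : (PySem.Str.slice s none (some (PySem.Str.find s sep))).toList
            = s.toList.take (PySem.Str.find s sep).toNat := by
          rw [PySem.Str.toList_slice, PySem.Chars.slice_eq_listSlice,
            PySem.List.slice_to _ hfind]
        rw [h2]
        simp
    · have : 0 ≤ PySem.Str.find s sep := by
        rw [PySem.Str.find_nonneg_iff]; rwa [PySem.Str.isIn_iff_infix] at hin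
      omega
  · rw [if_neg hin, if_pos]
    have : PySem.Str.find s sep = -1 := by
      rw [PySem.Str.find_eq_neg_one_iff]
      intro hinf
      exact hin (PySem.Str.isIn_iff_infix sep s |>.mpr hinf)
    omega

-- one phrase-removal step of B equals one replace of A, String level
theorem pvDropStep (s ph : String) (h : ph.toList ≠ []) :
    PySem.Str.join "" ((PySem.Str.split? s ph).getD []) = PySem.Str.replace s ph "" := by
  apply String.toList_inj.mp
  have hsp := PySem.Str.split?_map s ph
  rw [PySem.Chars.split?, if_neg (by simpa [List.isEmpty_iff] using h)] at hsp
  cases hps : PySem.Str.split? s ph with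
  | none => rw [hps] at hsp; simp at hsp
  | some parts =>
    rw [hps] at hsp
    simp only [Option.map_some, Option.some_inj] at hsp
    rw [Option.getD_some, PySem.Str.toList_join, PySem.Str.toList_replace]
    show PySem.Chars.join ("".toList) (parts.map String.toList) = _
    rw [hsp]
    have : ("".toList : List Char) = [] := rfl
    rw [this, pvDropChars _ _ h]

theorem pvMain (title : String) : clean_title_for_search title = clean_title_for_search_alt title := by
  unfold clean_title_for_search clean_title_for_search_alt
  simp only [List.foldl, pvCut, pvDropPhrases]
  rw [pvCutStep _ " $" (by decide), pvCutStep _ " from " (by decide), pvCutStep _ " +" (by decide),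
    pvCutStep _ " -" (by decide), pvCutStep _ " @" (by decide)]
  rw [pvDropStep _ "(various colors)" (by decide), pvDropStep _ "(various sizes)" (by decide),
    pvDropStep _ "(select colors)" (by decide), pvDropStep _ "(select sizes)" (by decide)]

-- ===== VERDICT (by name: the statement is the Claim_ definition above) =====
theorem clean_title_for_search_spec : Claim_equal_clean_title_for_search := by
  intro title _
  unfold Spec_clean_title_for_search
  exact pvMain title
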